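-- pv_equiv track=rewrite | github.com/wronai/gollm | src/gollm/validation/execution_monitor.py | _extract_traceback
-- ===== SOURCE A (Python) =====
-- from typing import Dict, Any, Optional
--
-- def _extract_traceback(stderr: str) -> Optional[str]:
--     """Wyodrębnia traceback z stderr"""
--     lines = stderr.split('\n')
--     traceback_lines = []
--     capturing = False
--
--     for line in lines:
--         if line.startswith('Traceback'):
--             capturing = True
--         if capturing:
--             traceback_lines.append(line)
--
--     return '\n'.join(traceback_lines) if traceback_lines else None
-- ===== SOURCE B (Python) =====
-- from typing import Optional
--
-- def _extract_traceback(stderr: str) -> Optional[str]: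
--     """Wyodrębnia traceback z stderr"""
--     lines = stderr.split('\n')
--     for i, line in enumerate(lines):
--         if line.startswith('Traceback'):
--             return '\n'.join(lines[i:])
--     return None
-- ===== Notes on version B (the rewrite author's own statement) =====
-- stated objective: simpler
-- what changed: Replaces the boolean-flag accumulation loop (append every line once capturing starts, then join) with an early-return scan that finds the index of the first line beginning with the traceback marker and joins the suffix slice of the line list in one operation.
import Mathlib
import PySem

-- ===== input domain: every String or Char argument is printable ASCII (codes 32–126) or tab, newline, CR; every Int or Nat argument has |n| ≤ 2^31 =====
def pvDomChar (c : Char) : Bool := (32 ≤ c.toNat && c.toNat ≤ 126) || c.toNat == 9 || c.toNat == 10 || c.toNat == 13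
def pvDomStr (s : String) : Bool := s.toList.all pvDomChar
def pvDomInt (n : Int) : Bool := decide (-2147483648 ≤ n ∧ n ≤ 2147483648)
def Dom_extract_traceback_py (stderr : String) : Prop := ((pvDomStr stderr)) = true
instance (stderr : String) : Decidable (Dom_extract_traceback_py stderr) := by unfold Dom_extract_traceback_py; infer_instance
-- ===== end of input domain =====

-- B replaces A's boolean-flag accumulation loop with an index-finding early-return scan that joins the suffix slice once (objective: simpler).

-- line.startswith('Traceback'), shared by both ports
def pvTb (l : String) : Bool := PySem.Str.startswith l "Traceback"

-- ===== PORT A =====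
-- the for-loop of A: state is (capturing, traceback_lines)
def pvALoop : List String → Bool → List String → Bool × List String
  | [], cap, acc => (cap, acc)
  | l :: ls, cap, acc =>
    let cap' := if pvTb l then true else cap
    let acc' := if cap' then acc ++ [l] else acc
    pvALoop ls cap' acc'

def extract_traceback_py (stderr : String) : Option String :=
  let lines := (PySem.Str.split? stderr "\n").getD []
  let tb := (pvALoop lines false []).2
  if tb = [] then none else some (PySem.Str.join "\n" tb)

-- ===== PORT B =====
-- the for-enumerate loop of B: on the first matching line return the joined suffix lines[i:]
def pvBScan (lines : List String) : Nat → List String → Option String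
  | _, [] => none
  | i, l :: ls =>
    if pvTb l then some (PySem.Str.join "\n" (lines.drop i))
    else pvBScan lines (i + 1) ls

def extract_traceback_py_alt (stderr : String) : Option String :=
  let lines := (PySem.Str.split? stderr "\n").getD []
  pvBScan lines 0 lines

-- ===== PRECONDITION & SPEC =====
def Spec_extract_traceback_py (stderr : String) (out : Option String) : Prop := out = extract_traceback_py_alt stderr
instance (stderr : String) (out : Option String) : Decidable (Spec_extract_traceback_py stderr out) := by unfold Spec_extract_traceback_py; infer_instance

-- ===== CLAIM (what is proved, stated in full; the proofs are below) =====
def Claim_equal_extract_traceback_py : Prop := ∀ (stderr : String), Dom_extract_traceback_py stderr → Spec_extract_traceback_py stderr (extract_traceback_py stderr)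

-- ===== LEMMAS AND PROOFS =====

-- A's loop with capturing already true appends every remaining line
lemma pvALoop_true (ls : List String) : ∀ acc, pvALoop ls true acc = (true, acc ++ ls) := by
  induction ls with
  | nil => simp [pvALoop]
  | cons l ls ih => intro acc; simp [pvALoop, ih]

-- A's loop starting uncaptured accumulates exactly the suffix from the first matching line
lemma pvALoop_false (ls : List String) :
    ∀ acc, (pvALoop ls false acc).2 = acc ++ ls.dropWhile (fun l => !pvTb l) := by
  induction ls with
  | nil => simp [pvALoop]
  | cons l ls ih =>
    intro acc
    by_cases h : pvTb l
    · simp [pvALoop, h, pvALoop_true, List.dropWhile]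
    · simp [pvALoop, h, ih, List.dropWhile]

-- B's scan described via dropWhile on the remaining lines
lemma pvBScan_eq (lines : List String) (ls : List String) :
    ∀ i, ls = lines.drop i →
      pvBScan lines i ls =
        (if ls.dropWhile (fun l => !pvTb l) = [] then none
         else some (PySem.Str.join "\n" (ls.dropWhile (fun l => !pvTb l)))) := by
  induction ls with
  | nil => intro i _; simp [pvBScan, List.dropWhile]
  | cons l ls ih =>
    intro i hsuf
    by_cases h : pvTb l
    · simp [pvBScan, h, List.dropWhile, ← hsuf]
    · have hsuf' : ls = lines.drop (i + 1) := by
        have : (l :: ls).drop 1 = (lines.drop i).drop 1 := by rw [hsuf]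
        simpa [List.drop_drop, Nat.add_comm] using this
      simp [pvBScan, h, List.dropWhile, ih (i + 1) hsuf']

-- the equivalence on an arbitrary list of lines
lemma pvMain (L : List String) :
    (if (pvALoop L false []).2 = [] then none
     else some (PySem.Str.join "\n" (pvALoop L false []).2)) = pvBScan L 0 L := by
  rw [pvALoop_false, pvBScan_eq L L 0 (by simp)]
  simp

-- ===== VERDICT (by name: the statement is the Claim_ definition above) =====
theorem extract_traceback_py_spec : Claim_equal_extract_traceback_py := by
  intro stderr _
  exact pvMain ((PySem.Str.split? stderr "\n").getD [])
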